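-- pv_equiv track=rewrite | github.com/nikhilvallishayee/duh | duh/tools/bash_ast.py | _extract_process_subs
-- ===== SOURCE A (Python) =====
-- def _extract_process_subs(cmd: str, masked: str) -> tuple[str, list[str]]:
--     """Extract ``<(...)`` and ``>(...)`` process substitutions.
--
--     Returns the command with process subs replaced by placeholders,
--     and a list of the extracted inner contents.
--     """
--     subshells: list[str] = []
--     result_chars = list(cmd)
--     i = 0
--
--     while i < len(masked):
--         if (i + 1 < len(masked)
--                 and masked[i] in "<>"
--                 and masked[i + 1] == "("
--                 and masked[i] != "\x00"):
--             # Make sure this is a process substitution, not $( or a regular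
--             # redirect.  Process subs are <( or >( where the preceding char
--             # is not $.
--             if i > 0 and masked[i - 1] == "$":
--                 i += 1
--                 continue
--             depth = 1
--             start = i
--             j = i + 2
--             while j < len(masked) and depth > 0:
--                 if masked[j] == "(" and masked[j] != "\x00":
--                     depth += 1
--                 elif masked[j] == ")" and masked[j] != "\x00":
--                     depth -= 1
--                 j += 1
--             if depth == 0:
--                 inner = cmd[start + 2:j - 1]
--                 subshells.append(inner)
--                 for k in range(start, j):
--                     result_chars[k] = "\x01"
--                 masked = masked[:start] + "\x01" * (j - start) + masked[j:]
--             i = j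
--         else:
--             i += 1
--
--     return "".join(result_chars), subshells
-- ===== SOURCE B (Python) =====
-- def _extract_process_subs(cmd: str, masked: str) -> tuple[str, list[str]]:
--     """Different algorithm: instead of depth-counting an inner loop at each
--     candidate, build a matching-paren table for all of ``masked`` once with a
--     stack, then walk the candidates using that table and assemble the output
--     from whole slices of ``cmd``."""
--     match: dict[int, int] = {}
--     stack: list[int] = []
--     for idx, ch in enumerate(masked):
--         if ch == "(":
--             stack.append(idx)
--         elif ch == ")" and stack:
--             match[stack.pop()] = idx
--     n = len(masked)
--     pieces: list[str] = []
--     subshells: list[str] = []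
--     prev = 0
--     i = 0
--     while i < n:
--         if (masked[i] in "<>" and i + 1 < n and masked[i + 1] == "("
--                 and not (i > 0 and masked[i - 1] == "$")):
--             close = match.get(i + 1)
--             if close is None:
--                 # unmatched "(": the scan runs off the end, nothing more is found
--                 break
--             pieces.append(cmd[prev:i])
--             pieces.append("\x01" * (close + 1 - i))
--             subshells.append(cmd[i + 2:close])
--             prev = close + 1
--             i = close + 1
--         else:
--             i += 1
--     pieces.append(cmd[prev:])
--     return "".join(pieces), subshells
-- ===== Notes on version B (the rewrite author's own statement) =====
-- stated objective: faster
-- what changed: A depth-counts an inner loop at each <( / >( candidate and rebuilds the masked string per match; B first builds a matching-paren table for the whole string with a stack in one fold, then walks the candidates with O(1) table lookups and assembles the output from whole slices, avoiding A's per-match O(n) string rebuild.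
-- outside the precondition, e.g. on _extract_process_subs('ab', 'abcd'): A returns ('ab', []), B returns ('ab', []); on _extract_process_subs('<(', '<(x)'): A raises IndexError, B returns ('\x01\x01\x01\x01', [''])
import Mathlib
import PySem

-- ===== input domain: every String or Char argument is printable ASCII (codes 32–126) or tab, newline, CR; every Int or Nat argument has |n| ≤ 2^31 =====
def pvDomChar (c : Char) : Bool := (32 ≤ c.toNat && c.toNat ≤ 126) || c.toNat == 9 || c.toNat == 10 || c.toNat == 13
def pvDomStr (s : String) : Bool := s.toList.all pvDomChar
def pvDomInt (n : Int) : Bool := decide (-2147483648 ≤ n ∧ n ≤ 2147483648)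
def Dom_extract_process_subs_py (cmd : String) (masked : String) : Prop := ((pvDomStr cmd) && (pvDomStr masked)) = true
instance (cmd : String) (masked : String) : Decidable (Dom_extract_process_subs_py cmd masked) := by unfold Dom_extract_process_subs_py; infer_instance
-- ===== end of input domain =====

-- B replaces A's per-candidate depth-counting inner loop (plus per-match rebuild of masked) by a
-- matching-paren table built once with a stack and an outer walk using table lookups, assembling the
-- output from whole slices (measured faster in a timing run); equivalence is about the return
-- value only (neither implementation mutates its arguments).

-- ===== PORT A =====
-- inner `while j < len(masked) and depth > 0` loop; fuel only makes the loop total (one unit per iteration)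
def pvBalA (m : List Char) (j : Nat) (depth : Int) : Nat → Nat × Int
  | 0 => (j, depth)
  | fuel + 1 =>
    if j < m.length ∧ 0 < depth then
      if m.getD j ' ' = '(' ∧ m.getD j ' ' ≠ '\x00' then pvBalA m (j + 1) (depth + 1) fuel
      else if m.getD j ' ' = ')' ∧ m.getD j ' ' ≠ '\x00' then pvBalA m (j + 1) (depth - 1) fuel
      else pvBalA m (j + 1) depth fuel
    else (j, depth)

-- outer `while i < len(masked)` loop of A; i strictly increases, so `len(masked)+1` fuel units suffice
def pvLoopA (cmd : List Char) (res m : List Char) (i : Nat) (subs : List (List Char)) : Nat → List Char × List (List Char)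
  | 0 => (res, subs)
  | fuel + 1 =>
    if i < m.length then
      if i + 1 < m.length ∧ (m.getD i ' ' = '<' ∨ m.getD i ' ' = '>') ∧ m.getD (i + 1) ' ' = '(' ∧ m.getD i ' ' ≠ '\x00' then
        if 0 < i ∧ m.getD (i - 1) ' ' = '$' then
          pvLoopA cmd res m (i + 1) subs fuel
        else
          let p := pvBalA m (i + 2) 1 m.length
          if p.2 = 0 then
            let inner := (cmd.drop (i + 2)).take (p.1 - 1 - (i + 2))
            let res' := (List.range' i (p.1 - i)).foldl (fun r k => r.set k '\x01') res
            let m' := m.take i ++ List.replicate (p.1 - i) '\x01' ++ m.drop p.1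
            pvLoopA cmd res' m' p.1 (subs ++ [inner]) fuel
          else
            pvLoopA cmd res m p.1 subs fuel
      else
        pvLoopA cmd res m (i + 1) subs fuel
    else (res, subs)

def extract_process_subs_py (cmd : String) (masked : String) : String × List String :=
  let r := pvLoopA cmd.toList cmd.toList masked.toList 0 [] (masked.toList.length + 1)
  (String.mk r.1, r.2.map String.mk)

-- ===== PORT B =====
-- B's first pass: one step of the `for idx, ch in enumerate(masked)` fold
-- (the Python stack pops from the end; the port keeps the top at the head of the list)
def pvMatchStep (st : PySem.Dict Nat Nat × List Nat) (p : Char × Nat) : PySem.Dict Nat Nat × List Nat :=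
  if p.1 = '(' then (st.1, p.2 :: st.2)
  else if p.1 = ')' then
    match st.2 with
    | [] => st
    | a :: rest => (st.1.insert a p.2, rest)
  else st

-- the matching-paren table: match[open] = close
def pvMatchB (m : List Char) : PySem.Dict Nat Nat :=
  (m.zipIdx.foldl pvMatchStep (PySem.Dict.empty, [])).1

-- B's `while i < n` walk: candidates are resolved by a table lookup; `close is None` breaks
def pvLoopB (mt : PySem.Dict Nat Nat) (cmd m : List Char) (i prev : Nat)
    (pieces subs : List (List Char)) : Nat → List (List Char) × List (List Char) × Nat
  | 0 => (pieces, subs, prev)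
  | fuel + 1 =>
    if i < m.length then
      if (m.getD i ' ' = '<' ∨ m.getD i ' ' = '>') ∧ (i + 1 < m.length ∧ m.getD (i + 1) ' ' = '(')
          ∧ ¬(0 < i ∧ m.getD (i - 1) ' ' = '$') then
        match mt.get? (i + 1) with
        | none => (pieces, subs, prev)
        | some c =>
          pvLoopB mt cmd m (c + 1) (c + 1)
            (pieces ++ [(cmd.drop prev).take (i - prev)] ++ [List.replicate (c + 1 - i) '\x01'])
            (subs ++ [(cmd.drop (i + 2)).take (c - (i + 2))]) fuel
      else pvLoopB mt cmd m (i + 1) prev pieces subs fuel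
    else (pieces, subs, prev)

def extract_process_subs_py_alt (cmd : String) (masked : String) : String × List String :=
  let mt := pvMatchB masked.toList
  let r := pvLoopB mt cmd.toList masked.toList 0 0 [] [] (masked.toList.length + 1)
  (String.mk ((r.1 ++ [cmd.toList.drop r.2.2]).flatten), r.2.1.map String.mk)

-- ===== PRECONDITION & SPEC =====
-- Pre_ excludes inputs with masked longer than cmd (the caller always passes a same-length mask of
-- cmd): there a matched process-substitution span can extend past cmd's end and A raises IndexError.
def Pre_extract_process_subs_py (cmd : String) (masked : String) : Prop :=
  masked.toList.length ≤ cmd.toList.length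
instance (cmd : String) (masked : String) : Decidable (Pre_extract_process_subs_py cmd masked) := by
  unfold Pre_extract_process_subs_py; infer_instance

def pvWitness_extract_process_subs_py : String × String := ("echo <(ls) x", "echo <(ls) x")

def Spec_extract_process_subs_py (cmd : String) (masked : String) (out : String × List String) : Prop := out = extract_process_subs_py_alt cmd masked
instance (cmd : String) (masked : String) (out : String × List String) : Decidable (Spec_extract_process_subs_py cmd masked out) := by unfold Spec_extract_process_subs_py; infer_instance

-- ===== CLAIM (what is proved, stated in full; the proofs are below) =====
def Claim_equal_extract_process_subs_py : Prop := ∀ (cmd : String) (masked : String), Dom_extract_process_subs_py cmd masked → Pre_extract_process_subs_py cmd masked → Spec_extract_process_subs_py cmd masked (extract_process_subs_py cmd masked)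

-- ===== LEMMAS AND PROOFS =====

-- proof-side depth-balancing loop without the vacuous '\x00' tests (the bridge to both ports)
def pvBalB (m : List Char) (j : Nat) (depth : Int) : Nat → Nat × Int
  | 0 => (j, depth)
  | fuel + 1 =>
    if j < m.length ∧ 0 < depth then
      if m.getD j ' ' = '(' then pvBalB m (j + 1) (depth + 1) fuel
      else if m.getD j ' ' = ')' then pvBalB m (j + 1) (depth - 1) fuel
      else pvBalB m (j + 1) depth fuel
    else (j, depth)

-- proof-side span collector: the (start, end) spans both programs agree on
def pvScanB (m : List Char) (i : Nat) (spans : List (Nat × Nat)) : Nat → List (Nat × Nat)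
  | 0 => spans
  | fuel + 1 =>
    if i < m.length then
      if (m.getD i ' ' = '<' ∨ m.getD i ' ' = '>') ∧ (i + 1 < m.length ∧ m.getD (i + 1) ' ' = '(')
          ∧ ¬(0 < i ∧ m.getD (i - 1) ' ' = '$') then
        let p := pvBalB m (i + 2) 1 m.length
        if p.2 = 0 then pvScanB m p.1 (spans ++ [(i, p.1)]) fuel
        else pvScanB m p.1 spans fuel
      else pvScanB m (i + 1) spans fuel
    else spans

-- blanking [s, e) with '\x01', as A's for-loop does
def pvSetRange (r : List Char) (s e : Nat) : List Char :=
  (List.range' s (e - s)).foldl (fun r k => r.set k '\x01') r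

def pvBlankFold (res : List Char) (spans : List (Nat × Nat)) : List Char :=
  spans.foldl (fun r p => pvSetRange r p.1 p.2) res

def pvInnerOf (cmd : List Char) (p : Nat × Nat) : List Char :=
  (cmd.drop (p.1 + 2)).take (p.2 - 1 - (p.1 + 2))

-- B's pieces list and final prev, driven by the span list
def pvPieces (cmd : List Char) : Nat → List (Nat × Nat) → List (List Char)
  | _, [] => []
  | prev, (s, e) :: r =>
    (cmd.drop prev).take (s - prev) :: List.replicate (e - s) '\x01' :: pvPieces cmd e r

def pvEnd : Nat → List (Nat × Nat) → Nat
  | prev, [] => prev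
  | _, (_, e) :: r => pvEnd e r

-- spans-driven builder (bridge between the blank-fold and B's pieces)
def pvBuildB (cmd : List Char) : List (Nat × Nat) → Nat → List Char × List (List Char)
  | [], prev => (cmd.drop prev, [])
  | (s, e) :: rest, prev =>
    let t := pvBuildB cmd rest e
    ((cmd.drop prev).take (s - prev) ++ List.replicate (e - s) '\x01' ++ t.1,
     (cmd.drop (s + 2)).take (e - 1 - (s + 2)) :: t.2)

-- spans are ordered, start after p, and end at or before L
def pvChain (p L : Nat) : List (Nat × Nat) → Prop
  | [] => True
  | (s, e) :: r => p ≤ s ∧ s ≤ e ∧ e ≤ L ∧ pvChain e L r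

theorem pvBalAB (m : List Char) (f : Nat) : ∀ j d, pvBalA m j d f = pvBalB m j d f := by
  induction f with
  | zero => intro j d; rfl
  | succ f ih =>
    intro j d
    simp only [pvBalA, pvBalB]
    by_cases hg : j < m.length ∧ 0 < d
    · rw [if_pos hg, if_pos hg]
      by_cases h1 : m.getD j ' ' = '('
      · have : ('(' : Char) ≠ '\x00' := by decide
        rw [if_pos ⟨h1, by rw [h1]; exact this⟩, if_pos h1, ih]
      · by_cases h2 : m.getD j ' ' = ')'
        · have : (')' : Char) ≠ '\x00' := by decide
          rw [if_neg (fun hc => h1 hc.1), if_neg h1, if_pos ⟨h2, by rw [h2]; exact this⟩, if_pos h2, ih]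
        · rw [if_neg (fun hc => h1 hc.1), if_neg h1, if_neg (fun hc => h2 hc.1), if_neg h2, ih]
    · rw [if_neg hg, if_neg hg]

theorem pvBalB_congr (m m' : List Char) (hl : m'.length = m.length) (f : Nat) :
    ∀ j d, (∀ k, j ≤ k → m'.getD k ' ' = m.getD k ' ') → pvBalB m' j d f = pvBalB m j d f := by
  induction f with
  | zero => intro j d _; rfl
  | succ f ih =>
    intro j d hag
    have hj : m'.getD j ' ' = m.getD j ' ' := hag j le_rfl
    have hag' : ∀ k, j + 1 ≤ k → m'.getD k ' ' = m.getD k ' ' :=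
      fun k hk => hag k (Nat.le_of_succ_le hk)
    simp only [pvBalB, hl, hj]
    by_cases hg : j < m.length ∧ 0 < d
    · rw [if_pos hg, if_pos hg]
      by_cases h1 : m.getD j ' ' = '('
      · rw [if_pos h1, if_pos h1, ih _ _ hag']
      · by_cases h2 : m.getD j ' ' = ')'
        · rw [if_neg h1, if_neg h1, if_pos h2, if_pos h2, ih _ _ hag']
        · rw [if_neg h1, if_neg h1, if_neg h2, if_neg h2, ih _ _ hag']
    · rw [if_neg hg, if_neg hg]

theorem pvBalB_le (m : List Char) (f : Nat) : ∀ j d, j ≤ (pvBalB m j d f).1 := by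
  induction f with
  | zero => intro j d; exact le_rfl
  | succ f ih =>
    intro j d
    simp only [pvBalB]
    split_ifs with hg h1 h2
    · exact Nat.le_of_succ_le (ih (j + 1) (d + 1))
    · exact Nat.le_of_succ_le (ih (j + 1) (d - 1))
    · exact Nat.le_of_succ_le (ih (j + 1) d)
    · exact le_rfl

theorem pvBalB_zero (m : List Char) (f : Nat) : ∀ j d, 0 < d → (pvBalB m j d f).2 = 0 →
    (pvBalB m j d f).1 ≤ m.length ∧ j < (pvBalB m j d f).1 ∧ m.getD ((pvBalB m j d f).1 - 1) ' ' = ')' := by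
  induction f with
  | zero =>
    intro j d hd h0
    exact absurd h0 (by simpa [pvBalB] using (Int.ne_of_gt hd))
  | succ f ih =>
    intro j d hd h0
    simp only [pvBalB] at h0 ⊢
    split_ifs at h0 ⊢ with hg h1 h2
    · rcases ih (j + 1) (d + 1) (by omega) h0 with ⟨a, b, c⟩
      exact ⟨a, by omega, c⟩
    · by_cases hz : d - 1 = 0
      · have hstop : ∀ g, pvBalB m (j + 1) (d - 1) g = (j + 1, d - 1) := by
          intro g; cases g with
          | zero => rfl
          | succ g => simp only [pvBalB]; rw [if_neg (by omega)]
        rw [hstop] at h0 ⊢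
        exact ⟨by omega, by omega, by simpa using h2⟩
      · rcases ih (j + 1) (d - 1) (by omega) h0 with ⟨a, b, c⟩
        exact ⟨a, by omega, c⟩
    · rcases ih (j + 1) d hd h0 with ⟨a, b, c⟩
      exact ⟨a, by omega, c⟩
    · exact absurd h0 (Int.ne_of_gt hd)

theorem pvBalB_stall (m : List Char) (j : Nat) (d : Int) (g : Nat)
    (h : ¬(j < m.length ∧ 0 < d)) : pvBalB m j d g = (j, d) := by
  cases g with
  | zero => rfl
  | succ g => simp only [pvBalB]; rw [if_neg h]

theorem pvBalB_add (m : List Char) (f g : Nat) : ∀ j d,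
    pvBalB m j d (f + g) = pvBalB m (pvBalB m j d f).1 (pvBalB m j d f).2 g := by
  induction f with
  | zero => intro j d; simp [pvBalB]
  | succ f ih =>
    intro j d
    rw [Nat.succ_add]
    simp only [pvBalB]
    by_cases hg : j < m.length ∧ 0 < d
    · rw [if_pos hg, if_pos hg]
      split_ifs <;> exact ih _ _
    · rw [if_neg hg, if_neg hg]
      exact (pvBalB_stall m j d g hg).symm

theorem pvScanB_acc (m : List Char) (f : Nat) : ∀ i sp, pvScanB m i sp f = sp ++ pvScanB m i [] f := by
  induction f with
  | zero => intro i sp; simp [pvScanB]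
  | succ f ih =>
    intro i sp
    simp only [pvScanB]
    split_ifs with h1 h2 h3
    · rw [ih _ (sp ++ [(i, _)]), ih _ ([] ++ [(i, _)])]; simp
    · rw [ih _ sp]
    · rw [ih _ sp]
    · simp

theorem pvScanB_stop (m : List Char) (f : Nat) (i : Nat) (sp : List (Nat × Nat))
    (h : m.length ≤ i) : pvScanB m i sp f = sp := by
  cases f with
  | zero => rfl
  | succ f => simp only [pvScanB]; rw [if_neg (by omega)]

theorem pvChain_mono {L : Nat} : ∀ {sp p q}, p ≤ q → pvChain q L sp → pvChain p L sp := by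
  intro sp
  cases sp with
  | nil => intro p q _ _; trivial
  | cons a r =>
    intro p q hpq hc
    obtain ⟨s, e⟩ := a
    exact ⟨le_trans hpq hc.1, hc.2.1, hc.2.2⟩

theorem pvScanB_chain (m : List Char) (f : Nat) : ∀ i, pvChain i m.length (pvScanB m i [] f) := by
  induction f with
  | zero => intro i; trivial
  | succ f ih =>
    intro i
    simp only [pvScanB]
    split_ifs with h1 h2 h3
    · rw [pvScanB_acc]
      rcases pvBalB_zero m m.length (i + 2) 1 (by omega) h3 with ⟨ha, hb, _⟩
      exact ⟨le_rfl, Nat.le_of_lt (Nat.lt_of_le_of_lt (Nat.le_add_right i 2) hb), ha, ih _⟩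
    · exact pvChain_mono (le_trans (by omega) (pvBalB_le m m.length (i + 2) 1)) (ih _)
    · exact pvChain_mono (by omega) (ih _)
    · trivial

-- the A-side scan equivalence: A's mutating loop = blank-fold over the span list
theorem pvLoopA_eq_scan (cmd m0 : List Char) (f : Nat) :
    ∀ (m' res : List Char) (i : Nat) (subs : List (List Char)),
      m'.length = m0.length →
      (∀ k, i ≤ k → m'.getD k ' ' = m0.getD k ' ') →
      (i = 0 ∨ (m'.getD (i - 1) ' ' = '$' ↔ m0.getD (i - 1) ' ' = '$')) →
      pvLoopA cmd res m' i subs f =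
        (pvBlankFold res (pvScanB m0 i [] f), subs ++ (pvScanB m0 i [] f).map (pvInnerOf cmd)) := by
  intro m' res i subs
  induction f generalizing m' res i subs with
  | zero => intro hl hag hdol; simp [pvLoopA, pvScanB, pvBlankFold]
  | succ f ih =>
    intro hl hag hdol
    simp only [pvLoopA, pvScanB]
    by_cases hi : i < m0.length
    · have e0 : m'.getD i ' ' = m0.getD i ' ' := hag i le_rfl
      have e1 : m'.getD (i + 1) ' ' = m0.getD (i + 1) ' ' := hag _ (by omega)
      have hDiff : (0 < i ∧ m'.getD (i - 1) ' ' = '$') ↔ (0 < i ∧ m0.getD (i - 1) ' ' = '$') := by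
        rcases hdol with h0 | hiff
        · subst h0; exact iff_of_false (fun h => absurd h.1 (by omega)) (fun h => absurd h.1 (by omega))
        · exact and_congr_right fun _ => hiff
      by_cases hcore : i + 1 < m0.length ∧ (m0.getD i ' ' = '<' ∨ m0.getD i ' ' = '>') ∧ m0.getD (i + 1) ' ' = '('
      · have hCA : i + 1 < m'.length ∧ (m'.getD i ' ' = '<' ∨ m'.getD i ' ' = '>') ∧
            m'.getD (i + 1) ' ' = '(' ∧ m'.getD i ' ' ≠ '\x00' := by
          refine ⟨by omega, by rw [e0]; exact hcore.2.1, by rw [e1]; exact hcore.2.2, ?_⟩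
          rw [e0]; rcases hcore.2.1 with h | h <;> rw [h] <;> decide
        by_cases hD : 0 < i ∧ m0.getD (i - 1) ' ' = '$'
        · rw [if_pos (show i < m'.length by omega), if_pos hCA, if_pos (hDiff.mpr hD),
            if_pos hi, if_neg (show ¬((m0.getD i ' ' = '<' ∨ m0.getD i ' ' = '>') ∧
              (i + 1 < m0.length ∧ m0.getD (i + 1) ' ' = '(') ∧ ¬(0 < i ∧ m0.getD (i - 1) ' ' = '$'))
              from fun hcb => hcb.2.2 hD)]
          exact ih m' res (i + 1) subs hl (fun k hk => hag k (by omega))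
            (Or.inr (by simp only [Nat.add_sub_cancel]; rw [e0]))
        · have hCB : (m0.getD i ' ' = '<' ∨ m0.getD i ' ' = '>') ∧
              (i + 1 < m0.length ∧ m0.getD (i + 1) ' ' = '(') ∧ ¬(0 < i ∧ m0.getD (i - 1) ' ' = '$') :=
            ⟨hcore.2.1, ⟨hcore.1, hcore.2.2⟩, hD⟩
          rw [if_pos (show i < m'.length by omega), if_pos hCA,
            if_neg (fun h => hD (hDiff.mp h)), if_pos hi, if_pos hCB]
          have hbal : pvBalA m' (i + 2) 1 m'.length = pvBalB m0 (i + 2) 1 m0.length := by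
            rw [pvBalAB, hl, pvBalB_congr m0 m' hl m0.length (i + 2) 1 (fun k hk => hag k (by omega))]
          simp only [hbal]
          by_cases hz : (pvBalB m0 (i + 2) 1 m0.length).2 = 0
          · rw [if_pos hz, if_pos hz, pvScanB_acc]
            rcases pvBalB_zero m0 m0.length (i + 2) 1 one_pos hz with ⟨hb1, hb2, hb3⟩
            have hlen2 : ((m'.take i ++ List.replicate ((pvBalB m0 (i + 2) 1 m0.length).1 - i) '\x01').length)
                = (pvBalB m0 (i + 2) 1 m0.length).1 := by
              simp only [List.length_append, List.length_take, List.length_replicate]; omega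
            have hl'' : (m'.take i ++ List.replicate ((pvBalB m0 (i + 2) 1 m0.length).1 - i) '\x01' ++
                m'.drop (pvBalB m0 (i + 2) 1 m0.length).1).length = m0.length := by
              simp only [List.length_append, List.length_take, List.length_replicate, List.length_drop]
              omega
            have hag'' : ∀ k, (pvBalB m0 (i + 2) 1 m0.length).1 ≤ k →
                (m'.take i ++ List.replicate ((pvBalB m0 (i + 2) 1 m0.length).1 - i) '\x01' ++
                  m'.drop (pvBalB m0 (i + 2) 1 m0.length).1).getD k ' ' = m0.getD k ' ' := by
              intro k hk
              rw [List.getD_eq_getElem?_getD, List.getElem?_append_right (by omega), hlen2,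
                List.getElem?_drop, ← List.getD_eq_getElem?_getD,
                show (pvBalB m0 (i + 2) 1 m0.length).1 + (k - (pvBalB m0 (i + 2) 1 m0.length).1) = k by omega]
              exact hag k (by omega)
            have hdol'' : ((m'.take i ++ List.replicate ((pvBalB m0 (i + 2) 1 m0.length).1 - i) '\x01' ++
                m'.drop (pvBalB m0 (i + 2) 1 m0.length).1).getD ((pvBalB m0 (i + 2) 1 m0.length).1 - 1) ' ' = '$')
                ↔ (m0.getD ((pvBalB m0 (i + 2) 1 m0.length).1 - 1) ' ' = '$') := by
              rw [List.getD_eq_getElem?_getD, List.getElem?_append_left (by omega),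
                List.getElem?_append_right (by simp only [List.length_take]; omega),
                List.getElem?_replicate, if_pos (by simp only [List.length_take]; omega)]
              rw [hb3]
              decide
            rw [ih _ _ _ _ hl'' hag'' (Or.inr hdol'')]
            simp [pvBlankFold, pvSetRange, pvInnerOf]
          · rw [if_neg hz, if_neg hz]
            have hple : i + 2 ≤ (pvBalB m0 (i + 2) 1 m0.length).1 := pvBalB_le m0 m0.length (i + 2) 1
            exact ih m' res _ subs hl (fun k hk => hag k (by omega))
              (Or.inr (by rw [hag ((pvBalB m0 (i + 2) 1 m0.length).1 - 1) (by omega)]))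
      · rw [if_pos (show i < m'.length by omega),
          if_neg (show ¬(i + 1 < m'.length ∧ (m'.getD i ' ' = '<' ∨ m'.getD i ' ' = '>') ∧
            m'.getD (i + 1) ' ' = '(' ∧ m'.getD i ' ' ≠ '\x00') from
            fun hca => hcore ⟨by omega, by rw [← e0]; exact hca.2.1, by rw [← e1]; exact hca.2.2.1⟩),
          if_pos hi,
          if_neg (show ¬((m0.getD i ' ' = '<' ∨ m0.getD i ' ' = '>') ∧
            (i + 1 < m0.length ∧ m0.getD (i + 1) ' ' = '(') ∧ ¬(0 < i ∧ m0.getD (i - 1) ' ' = '$')) from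
            fun hcb => hcore ⟨hcb.2.1.1, hcb.1, hcb.2.1.2⟩)]
        exact ih m' res (i + 1) subs hl (fun k hk => hag k (by omega))
          (Or.inr (by simp only [Nat.add_sub_cancel]; rw [e0]))
    · rw [if_neg (show ¬ i < m'.length by omega), if_neg hi]
      simp [pvBlankFold]

theorem pvFoldSet_length (ks : List Nat) : ∀ (r : List Char),
    (ks.foldl (fun r k => r.set k '\x01') r).length = r.length := by
  induction ks with
  | nil => intro r; rfl
  | cons k ks ih => intro r; simp [List.foldl_cons, ih]

theorem pvFoldSet_getElem? (ks : List Nat) : ∀ (r : List Char) (i : Nat),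
    (ks.foldl (fun r k => r.set k '\x01') r)[i]? =
      if i ∈ ks ∧ i < r.length then some '\x01' else r[i]? := by
  induction ks with
  | nil => intro r i; simp
  | cons k ks ih =>
    intro r i
    rw [List.foldl_cons, ih]
    simp only [List.length_set, List.getElem?_set, List.mem_cons]
    by_cases hik : i < r.length
    · by_cases hmem : i ∈ ks
      · simp [hmem, hik]
      · by_cases hki : k = i
        · simp [hmem, hik, hki]
        · simp only [hik, and_true, if_neg hki]
          split_ifs with h
          · rcases h with h | h
            · exact absurd h.symm hki
            · exact absurd h hmem
          · rfl
    · by_cases hki : k = i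
      · simp [hik, hki]
      · simp [hik, hki]

theorem pvSetRange_length (r : List Char) (s e : Nat) : (pvSetRange r s e).length = r.length :=
  pvFoldSet_length _ r

theorem pvSetRange_getElem? (r : List Char) (s e i : Nat) :
    (pvSetRange r s e)[i]? = if s ≤ i ∧ i < e ∧ i < r.length then some '\x01' else r[i]? := by
  rw [pvSetRange, pvFoldSet_getElem?]
  by_cases h : s ≤ i ∧ i < e ∧ i < r.length
  · rw [if_pos ⟨by rw [List.mem_range'_1]; omega, h.2.2⟩, if_pos h]
  · by_cases hm : i ∈ List.range' s (e - s) ∧ i < r.length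
    · rw [List.mem_range'_1] at hm; exact absurd ⟨by omega, by omega, hm.2⟩ h
    · rw [if_neg hm, if_neg h]

theorem pvBlankFold_length' : ∀ (sp : List (Nat × Nat)) (x : List Char),
    (pvBlankFold x sp).length = x.length := by
  intro sp
  induction sp with
  | nil => intro x; rfl
  | cons a r ih =>
    intro x
    obtain ⟨s, e⟩ := a
    have h0 : pvBlankFold x ((s, e) :: r) = pvBlankFold (pvSetRange x s e) r := rfl
    rw [h0, ih (pvSetRange x s e), pvSetRange_length]

theorem pvBlankFold_getElem?_lt {L : Nat} : ∀ (sp : List (Nat × Nat)) (x : List Char) (q i : Nat),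
    pvChain q L sp → i < q → (pvBlankFold x sp)[i]? = x[i]? := by
  intro sp
  induction sp with
  | nil => intro x q i _ _; rfl
  | cons a r ih =>
    intro x q i hc hi
    obtain ⟨s, e⟩ := a
    obtain ⟨h1, h2, h3, h4⟩ := hc
    have h0 : pvBlankFold x ((s, e) :: r) = pvBlankFold (pvSetRange x s e) r := rfl
    rw [h0, ih (pvSetRange x s e) e i h4 (by omega), pvSetRange_getElem?, if_neg (by omega)]

theorem pvBuildB_congr {L : Nat} : ∀ sp (c c' : List Char) p, c.drop p = c'.drop p → pvChain p L sp →
    pvBuildB c sp p = pvBuildB c' sp p := by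
  intro sp
  induction sp with
  | nil => intro c c' p h _; simp [pvBuildB, h]
  | cons a r ih =>
    intro c c' p h hc
    obtain ⟨s, e⟩ := a
    obtain ⟨h1, h2, h3, h4⟩ := hc
    have hdrop : ∀ q, p ≤ q → c.drop q = c'.drop q := by
      intro q hq
      rw [show q = p + (q - p) from by omega, ← List.drop_drop, ← List.drop_drop, h]
    simp only [pvBuildB]
    rw [h, hdrop (s + 2) (by omega), ih c c' e (hdrop e (by omega)) h4]

theorem pvBuildB_fst {L : Nat} : ∀ sp (c : List Char) p, pvChain p L sp → L ≤ c.length → p ≤ L →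
    (pvBuildB c sp p).1 = (pvBlankFold c sp).drop p := by
  intro sp
  induction sp with
  | nil => intro c p _ _ _; rfl
  | cons a r ih =>
    intro c p hc hL hp
    obtain ⟨s, e⟩ := a
    obtain ⟨h1, h2, h3, h4⟩ := hc
    have hdropeq : c.drop e = (pvSetRange c s e).drop e := by
      apply List.ext_getElem?
      intro i
      rw [List.getElem?_drop, List.getElem?_drop, pvSetRange_getElem?, if_neg (by omega)]
    have hstep : pvBuildB c ((s, e) :: r) p =
        ((c.drop p).take (s - p) ++ List.replicate (e - s) '\x01' ++ (pvBuildB c r e).1,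
          (c.drop (s + 2)).take (e - 1 - (s + 2)) :: (pvBuildB c r e).2) := rfl
    have hcongr : pvBuildB c r e = pvBuildB (pvSetRange c s e) r e :=
      pvBuildB_congr r c (pvSetRange c s e) e hdropeq h4
    have hIH : (pvBuildB (pvSetRange c s e) r e).1 = (pvBlankFold (pvSetRange c s e) r).drop e :=
      ih (pvSetRange c s e) e h4 (by rw [pvSetRange_length]; omega) h3
    have hRHS : pvBlankFold c ((s, e) :: r) = pvBlankFold (pvSetRange c s e) r := rfl
    rw [hstep, hRHS, hcongr, hIH]
    have hRlen : (pvBlankFold (pvSetRange c s e) r).length = c.length := by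
      rw [pvBlankFold_length', pvSetRange_length]
    have hRi : ∀ i, i < e → (pvBlankFold (pvSetRange c s e) r)[i]? = (pvSetRange c s e)[i]? :=
      fun i hi => pvBlankFold_getElem?_lt r (pvSetRange c s e) e i h4 hi
    have hA1 : ((c.drop p).take (s - p)).length = s - p := by
      simp only [List.length_take, List.length_drop]; omega
    have hA12 : ((c.drop p).take (s - p) ++ List.replicate (e - s) '\x01').length = e - p := by
      simp only [List.length_append, hA1, List.length_replicate]; omega
    apply List.ext_getElem?
    intro j
    by_cases hj1 : j < s - p
    · rw [List.getElem?_append_left (show j < ((c.drop p).take (s - p) ++ List.replicate (e - s) '\x01').length by omega),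
        List.getElem?_append_left (show j < ((c.drop p).take (s - p)).length by omega),
        List.getElem?_take_of_lt hj1, List.getElem?_drop,
        List.getElem?_drop, hRi (p + j) (by omega), pvSetRange_getElem?, if_neg (by omega)]
    · by_cases hj2 : j < e - p
      · rw [List.getElem?_append_left (show j < ((c.drop p).take (s - p) ++ List.replicate (e - s) '\x01').length by omega),
          List.getElem?_append_right (show ((c.drop p).take (s - p)).length ≤ j by omega), hA1,
          List.getElem?_replicate, if_pos (by omega),
          List.getElem?_drop, hRi (p + j) (by omega), pvSetRange_getElem?, if_pos ⟨by omega, by omega, by omega⟩]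
      · rw [List.getElem?_append_right (show ((c.drop p).take (s - p) ++ List.replicate (e - s) '\x01').length ≤ j by omega),
          hA12, List.getElem?_drop, List.getElem?_drop]
        congr 1
        omega

theorem pvPieces_flatten (cmd : List Char) : ∀ sp prev,
    (pvPieces cmd prev sp).flatten ++ cmd.drop (pvEnd prev sp) = (pvBuildB cmd sp prev).1 := by
  intro sp
  induction sp with
  | nil => intro prev; simp [pvPieces, pvEnd, pvBuildB]
  | cons a r ih =>
    intro prev
    obtain ⟨s, e⟩ := a
    simp only [pvPieces, pvEnd, pvBuildB, List.flatten_cons, List.append_assoc]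
    rw [ih e]

-- ===== the stack-built matching table agrees with depth balancing =====

def pvInv (m : List Char) (k : Nat) (st : PySem.Dict Nat Nat × List Nat) : Prop :=
  st.1.keys.Nodup ∧
  (∀ a, a ∈ st.2 → st.1.get? a = none) ∧
  (∀ a c, st.1.get? a = some c → a + 1 ≤ k ∧ ∀ f, m.length - (a + 1) ≤ f → pvBalB m (a + 1) 1 f = (c + 1, 0)) ∧
  (∀ t (h : t < st.2.length), st.2[t] + 1 ≤ k ∧ pvBalB m (st.2[t] + 1) 1 (k - (st.2[t] + 1)) = (k, (t : Int) + 1)) ∧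
  (∀ a, a < k → m.getD a ' ' = '(' → a ∈ st.2 ∨ (st.1.get? a).isSome)

theorem pvBalB_one (m : List Char) (j : Nat) (d : Int) (hg : j < m.length ∧ 0 < d) :
    pvBalB m j d 1 =
      (j + 1, if m.getD j ' ' = '(' then d + 1 else if m.getD j ' ' = ')' then d - 1 else d) := by
  simp only [pvBalB]
  rw [if_pos hg]
  split_ifs <;> rfl

theorem pvInv_step (m : List Char) (k : Nat) (st : PySem.Dict Nat Nat × List Nat)
    (hk : k < m.length) (h : pvInv m k st) :
    pvInv m (k + 1) (pvMatchStep st (m.getD k ' ', k)) := by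
  obtain ⟨hnd, hstn, hdict, hrun, hcov⟩ := h
  by_cases h1 : m.getD k ' ' = '('
  · -- push k
    have hstep : pvMatchStep st (m.getD k ' ', k) = (st.1, k :: st.2) := by
      simp only [pvMatchStep]
      rw [if_pos h1]
    rw [hstep]
    refine ⟨hnd, ?_, ?_, ?_, ?_⟩
    · intro a ha
      rcases List.mem_cons.mp ha with rfl | ha
      · cases hx : st.1.get? a with
        | none => rfl
        | some c => exact absurd (hdict a c hx).1 (by omega)
      · exact hstn a ha
    · intro a c hac
      exact ⟨by have := (hdict a c hac).1; omega, (hdict a c hac).2⟩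
    · intro t ht
      cases t with
      | zero =>
        refine ⟨by simp, ?_⟩
        simp only [List.getElem_cons_zero]
        rw [Nat.sub_self]
        simp [pvBalB]
      | succ u =>
        simp only [List.getElem_cons_succ]
        have hu : u < st.2.length := by simpa using ht
        obtain ⟨hle, hbal⟩ := hrun u hu
        refine ⟨by omega, ?_⟩
        have harith : (k + 1) - (st.2[u] + 1) = (k - (st.2[u] + 1)) + 1 := by omega
        rw [harith, pvBalB_add, hbal]
        simp only
        rw [pvBalB_one m k _ ⟨hk, by positivity⟩, if_pos h1]
        simp only [Prod.mk.injEq, true_and]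
        push_cast
        ring
    · intro a ha hpa
      by_cases hak : a = k
      · exact Or.inl (by rw [hak]; exact List.mem_cons_self)
      · rcases hcov a (by omega) hpa with hmem | hs
        · exact Or.inl (List.mem_cons_of_mem _ hmem)
        · exact Or.inr hs
  · by_cases h2 : m.getD k ' ' = ')'
    · cases hst : st.2 with
      | nil =>
        have hstep : pvMatchStep st (m.getD k ' ', k) = st := by
          simp only [pvMatchStep]
          rw [if_neg h1, if_pos h2, hst]
        rw [hstep]
        refine ⟨hnd, hstn, fun a c hac => ⟨by have := (hdict a c hac).1; omega, (hdict a c hac).2⟩, ?_, ?_⟩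
        · intro t ht
          obtain ⟨hle, hbal⟩ := hrun t ht
          refine ⟨by omega, ?_⟩
          have harith : (k + 1) - (st.2[t] + 1) = (k - (st.2[t] + 1)) + 1 := by omega
          rw [harith, pvBalB_add, hbal]
          simp only
          rw [pvBalB_one m k _ ⟨hk, by positivity⟩, if_neg h1, if_pos h2]
          have hT : t < st.2.length := ht
          rw [hst] at hT
          exact absurd hT (by simp)
        · intro a ha hpa
          have hak : a ≠ k := fun hq => by rw [hq] at hpa; exact absurd hpa (by rw [h2]; decide)
          exact hcov a (by omega) hpa
      | cons a0 rest =>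
        have hstep : pvMatchStep st (m.getD k ' ', k) = (st.1.insert a0 k, rest) := by
          simp only [pvMatchStep]
          rw [if_neg h1, if_pos h2, hst]
        rw [hstep]
        have hrun' : ∀ t (h : t < (a0 :: rest).length),
            (a0 :: rest)[t] + 1 ≤ k ∧
            pvBalB m ((a0 :: rest)[t] + 1) 1 (k - ((a0 :: rest)[t] + 1)) = (k, (t : Int) + 1) := by
          have h' := hrun
          simp only [hst] at h'
          exact h'
        obtain ⟨ha1, hbal0⟩ := hrun' 0 (by simp)
        simp only [List.getElem_cons_zero, Nat.cast_zero, zero_add] at ha1 hbal0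
        have hanotin : a0 ∉ rest := by
          intro hmem
          obtain ⟨u, hu, hua⟩ := List.mem_iff_getElem.mp hmem
          obtain ⟨_, hbalu⟩ := hrun' (u + 1) (by simpa using Nat.succ_lt_succ hu)
          simp only [List.getElem_cons_succ, hua] at hbalu
          rw [hbal0] at hbalu
          have : ((1 : Int)) = (u : Int) + 1 + 1 := by
            have h' := congrArg Prod.snd hbalu
            push_cast at h'
            simpa using h'
          omega
        have hclose : ∀ f, m.length - (a0 + 1) ≤ f → pvBalB m (a0 + 1) 1 f = (k + 1, 0) := by
          intro f hf
          have hf2 : f = (k - (a0 + 1)) + (1 + (f - (k - (a0 + 1)) - 1)) := by omega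
          rw [hf2, pvBalB_add, hbal0]
          simp only
          rw [pvBalB_add, pvBalB_one m k 1 ⟨hk, by norm_num⟩, if_neg h1, if_pos h2]
          simp only
          rw [pvBalB_stall m (k + 1) (1 - 1 : Int) _ (by norm_num)]
          norm_num
        refine ⟨PySem.Dict.nodup_keys_insert _ _ _ hnd, ?_, ?_, ?_, ?_⟩
        · intro a ha
          have hne : a ≠ a0 := fun hq => hanotin (hq ▸ ha)
          rw [PySem.Dict.get?_insert_of_ne _ _ hne]
          exact hstn a (hst ▸ List.mem_cons_of_mem _ ha)
        · intro a c hac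
          rw [PySem.Dict.get?_insert] at hac
          by_cases hae : a = a0
          · rw [if_pos hae] at hac
            have hck : c = k := by injection hac with h'; omega
            subst hck; subst hae
            exact ⟨by omega, hclose⟩
          · rw [if_neg hae] at hac
            exact ⟨by have := (hdict a c hac).1; omega, (hdict a c hac).2⟩
        · intro t ht
          have ht' : t < rest.length := ht
          show rest[t] + 1 ≤ k + 1 ∧
            pvBalB m (rest[t] + 1) 1 ((k + 1) - (rest[t] + 1)) = (k + 1, (t : Int) + 1)
          obtain ⟨hle, hbal⟩ := hrun' (t + 1) (by simpa using Nat.succ_lt_succ ht')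
          simp only [List.getElem_cons_succ] at hle hbal
          refine ⟨by omega, ?_⟩
          have harith : (k + 1) - (rest[t] + 1) = (k - (rest[t] + 1)) + 1 := by omega
          rw [harith, pvBalB_add, hbal]
          simp only
          rw [pvBalB_one m k _ ⟨hk, by push_cast; omega⟩, if_neg h1, if_pos h2]
          simp only [Prod.mk.injEq, true_and]
          push_cast
          ring
        · intro a ha hpa
          have hak : a ≠ k := fun hq => by rw [hq] at hpa; exact absurd hpa (by rw [h2]; decide)
          rcases hcov a (by omega) hpa with hmem | hs
          · rw [hst] at hmem
            rcases List.mem_cons.mp hmem with rfl | hmem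
            · exact Or.inr (by rw [PySem.Dict.get?_insert_self]; rfl)
            · exact Or.inl hmem
          · by_cases hae : a = a0
            · exact Or.inr (by rw [hae, PySem.Dict.get?_insert_self]; rfl)
            · exact Or.inr (by rw [PySem.Dict.get?_insert_of_ne _ _ hae]; exact hs)
    · -- other char: state unchanged
      have hstep : pvMatchStep st (m.getD k ' ', k) = st := by
        simp only [pvMatchStep]
        rw [if_neg h1, if_neg h2]
      rw [hstep]
      refine ⟨hnd, hstn, fun a c hac => ⟨by have := (hdict a c hac).1; omega, (hdict a c hac).2⟩, ?_, ?_⟩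
      · intro t ht
        obtain ⟨hle, hbal⟩ := hrun t ht
        refine ⟨by omega, ?_⟩
        have harith : (k + 1) - (st.2[t] + 1) = (k - (st.2[t] + 1)) + 1 := by omega
        rw [harith, pvBalB_add, hbal]
        simp only
        rw [pvBalB_one m k _ ⟨hk, by positivity⟩, if_neg h1, if_neg h2]
      · intro a ha hpa
        have hak : a ≠ k := fun hq => h1 (by rw [← hq]; exact hpa)
        exact hcov a (by omega) hpa

theorem pvFold_inv (m : List Char) : ∀ (l : List Char) (k : Nat) (st : PySem.Dict Nat Nat × List Nat),
    m.drop k = l → pvInv m k st → pvInv m (k + l.length) (List.foldl pvMatchStep st (l.zipIdx k)) := by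
  intro l
  induction l with
  | nil => intro k st _ h; simpa using h
  | cons ch l' ih =>
    intro k st hdrop hinv
    have hk : k < m.length := by
      have := congrArg List.length hdrop
      simp only [List.length_drop, List.length_cons] at this
      omega
    have hch : m.getD k ' ' = ch := by
      have h0 : (m.drop k)[0]? = m[k]? := by simp
      rw [hdrop] at h0
      simp only [List.getElem?_cons_zero] at h0
      rw [List.getD_eq_getElem?_getD, ← h0]
      rfl
    have hdrop' : m.drop (k + 1) = l' := by
      have h2 : (m.drop k).drop 1 = l' := by rw [hdrop]; rfl
      rwa [List.drop_drop] at h2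
    have hlen : k + (ch :: l').length = (k + 1) + l'.length := by simp; omega
    rw [List.zipIdx_cons, List.foldl_cons, hlen]
    exact ih (k + 1) _ hdrop' (by rw [← hch]; exact pvInv_step m k st hk hinv)

theorem pvMatchB_inv (m : List Char) :
    pvInv m m.length (List.foldl pvMatchStep (PySem.Dict.empty, []) m.zipIdx) := by
  have h0 : pvInv m 0 ((PySem.Dict.empty : PySem.Dict Nat Nat), ([] : List Nat)) := by
    refine ⟨by simpa using PySem.Dict.nodup_keys_empty, by simp, ?_, by simp, by omega⟩
    intro a c hac
    rw [PySem.Dict.get?_empty] at hac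
    exact absurd hac (by simp)
  have := pvFold_inv m m 0 (PySem.Dict.empty, []) (by simp) h0
  simpa using this

theorem pvMatch_some (m : List Char) (a c : Nat) (h : (pvMatchB m).get? a = some c) :
    pvBalB m (a + 1) 1 m.length = (c + 1, 0) := by
  obtain ⟨_, _, hdict, _, _⟩ := pvMatchB_inv m
  exact (hdict a c h).2 m.length (by omega)

theorem pvMatch_none (m : List Char) (a : Nat) (ha : a < m.length) (hc : m.getD a ' ' = '(')
    (h : (pvMatchB m).get? a = none) :
    (pvBalB m (a + 1) 1 m.length).2 ≠ 0 ∧ (pvBalB m (a + 1) 1 m.length).1 = m.length := by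
  obtain ⟨_, _, _, hrun, hcov⟩ := pvMatchB_inv m
  rcases hcov a ha hc with hmem | hs
  · obtain ⟨t, ht, hta⟩ := List.mem_iff_getElem.mp hmem
    obtain ⟨hle, hbal⟩ := hrun t ht
    rw [hta] at hle hbal
    have hsplit : m.length = (m.length - (a + 1)) + (a + 1) := by omega
    have hfull : pvBalB m (a + 1) 1 m.length = (m.length, (t : Int) + 1) := by
      conv_lhs => rw [hsplit]
      rw [pvBalB_add, hbal]
      simp only
      exact pvBalB_stall m m.length ((t : Int) + 1) (a + 1) (by omega)
    rw [hfull]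
    constructor
    · simp only; positivity
    · rfl
  · unfold pvMatchB at h
    rw [h] at hs
    exact absurd hs (by simp)

-- the B-side walk equals the span-driven pieces/subs/prev
theorem pvLoopB_eq_scan (cmd m : List Char) (f : Nat) :
    ∀ i prev (pieces subs : List (List Char)),
      pvLoopB (pvMatchB m) cmd m i prev pieces subs f =
        (pieces ++ pvPieces cmd prev (pvScanB m i [] f),
         subs ++ (pvScanB m i [] f).map (pvInnerOf cmd),
         pvEnd prev (pvScanB m i [] f)) := by
  induction f with
  | zero => intro i prev pieces subs; simp [pvLoopB, pvScanB, pvPieces, pvEnd]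
  | succ f ih =>
    intro i prev pieces subs
    simp only [pvLoopB, pvScanB]
    by_cases hi : i < m.length
    · rw [if_pos hi, if_pos hi]
      by_cases hc : (m.getD i ' ' = '<' ∨ m.getD i ' ' = '>') ∧ (i + 1 < m.length ∧ m.getD (i + 1) ' ' = '(')
          ∧ ¬(0 < i ∧ m.getD (i - 1) ' ' = '$')
      · rw [if_pos hc, if_pos hc]
        cases hm : (pvMatchB m).get? (i + 1) with
        | none =>
          obtain ⟨hnz, hend⟩ := pvMatch_none m (i + 1) hc.2.1.1 hc.2.1.2 hm
          rw [show i + 1 + 1 = i + 2 from by omega] at hnz hend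
          rw [if_neg hnz, hend, pvScanB_stop m f m.length [] le_rfl]
          simp [pvPieces, pvEnd]
        | some c =>
          have hs := pvMatch_some m (i + 1) c hm
          rw [show i + 1 + 1 = i + 2 from by omega] at hs
          rw [hs]
          dsimp only
          rw [if_pos rfl, pvScanB_acc]
          rw [ih (c + 1) (c + 1) _ _]
          simp only [List.nil_append, List.map_cons, pvPieces, pvEnd,
            pvInnerOf, Nat.add_sub_cancel, List.append_assoc, List.cons_append]
      · rw [if_neg hc, if_neg hc]
        exact ih (i + 1) prev pieces subs
    · rw [if_neg hi, if_neg hi]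
      simp [pvPieces, pvEnd]

-- ===== VERDICT (by name: the statement is the Claim_ definition above) =====
theorem extract_process_subs_py_spec : Claim_equal_extract_process_subs_py := by
  intro cmd masked _ hpre
  unfold Spec_extract_process_subs_py extract_process_subs_py extract_process_subs_py_alt
  dsimp only
  have hx := pvLoopA_eq_scan cmd.toList masked.toList (masked.toList.length + 1)
    masked.toList cmd.toList 0 [] rfl (fun _ _ => rfl) (Or.inl rfl)
  rw [hx]
  rw [pvLoopB_eq_scan cmd.toList masked.toList (masked.toList.length + 1) 0 0 [] []]
  have hch := pvScanB_chain masked.toList (masked.toList.length + 1) 0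
  have hfst := pvBuildB_fst (L := masked.toList.length)
    (pvScanB masked.toList 0 [] (masked.toList.length + 1)) cmd.toList 0 hch hpre (Nat.zero_le _)
  have hflat := pvPieces_flatten cmd.toList (pvScanB masked.toList 0 [] (masked.toList.length + 1)) 0
  simp only [List.nil_append]
  refine Prod.ext ?_ ?_
  · simp only
    congr 1
    rw [List.flatten_append]
    simp only [List.flatten_cons, List.flatten_nil, List.append_nil]
    rw [hflat, hfst, List.drop_zero]
  · simp only
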